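-- pv_equiv track=rewrite | github.com/tzahifurmanski/advent_of_code_2023 | day1.py | generate_integers_list_part_2
-- ===== SOURCE A (Python) =====
-- def generate_integers_list_part_2(line):
--     digits = ["one", "two", "three", "four", "five", "six", "seven", "eight", "nine"]
--     list_of_integers = []
--     temp_string = ""
--     # Scan each character in the line
--     for char in line:
--         # If digit, save it and zero out saved string
--         if char.isdigit():
--             list_of_integers.append(int(char))
--             temp_string = ""
--
--         # If string, accumulate it and check if you got a written digit
--         else:
--             temp_string += char
--             for num, digit in enumerate(digits, start=1):
--                 if digit in temp_string:
--                     # If you did, save it and zero out saved string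
--                     list_of_integers.append(num)
--                     # There was a really interesting bug here -
--                     # In cases of "twone","eightwo", "threeight" I would miss the second number by "cleaning" the temp string  if I would clear out the temp string
--                     # Instead, I initiate it to the last char.
--                     # (and unless there are two numbers suffixes that are the same as two numbers prefexis, it should work).
--                     temp_string = char
--
--     return list_of_integers
-- ===== SOURCE B (Python) =====
-- def generate_integers_list_part_2(line):
--     words = ["one", "two", "three", "four", "five", "six", "seven", "eight", "nine"]
--     result = []
--     # Stateless positional scan: a spelled-out digit is emitted exactly where it
--     # ends in the line; no accumulated temp string is needed.
--     for i, ch in enumerate(line):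
--         if ch.isdigit():
--             result.append(int(ch))
--         else:
--             for num, w in enumerate(words, start=1):
--                 if line.endswith(w, 0, i + 1):
--                     result.append(num)
--                     break
--     return result
-- ===== Notes on version B (the rewrite author's own statement) =====
-- stated objective: faster
-- what changed: A accumulates an unbounded temp string with reset semantics and runs 9 substring-membership scans over it per character; B is a stateless positional scan that emits a spelled-out digit exactly where it ends, via line.endswith on the prefix up to the current position (correct because no digit word overlaps another by 2+ characters or contains another).
import Mathlib
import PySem

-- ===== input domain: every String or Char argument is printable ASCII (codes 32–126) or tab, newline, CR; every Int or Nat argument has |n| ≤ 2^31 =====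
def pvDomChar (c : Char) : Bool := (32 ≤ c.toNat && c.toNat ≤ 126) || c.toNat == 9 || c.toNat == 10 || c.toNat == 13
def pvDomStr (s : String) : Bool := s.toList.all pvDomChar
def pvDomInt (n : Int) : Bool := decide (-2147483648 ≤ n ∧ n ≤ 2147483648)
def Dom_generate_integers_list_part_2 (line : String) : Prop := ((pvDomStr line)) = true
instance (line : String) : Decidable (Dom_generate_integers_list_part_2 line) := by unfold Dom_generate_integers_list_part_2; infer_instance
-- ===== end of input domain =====

-- B replaces A's accumulated temp string (reset semantics + per-char substring scans)
-- by a stateless positional scan emitting a spelled-out digit where it ends, via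
-- endswith on the line prefix (objective: alternative algorithm; no argument is mutated).


-- ===== PORT A =====
-- digits = ["one", ..., "nine"] with enumerate(..., start=1) pre-paired
def pvDigitsA : List (Int × List Char) :=
  [(1, "one".toList), (2, "two".toList), (3, "three".toList), (4, "four".toList),
   (5, "five".toList), (6, "six".toList), (7, "seven".toList), (8, "eight".toList),
   (9, "nine".toList)]

-- one iteration of A's outer loop; state = (list_of_integers, temp_string)
def pvStepA (st : List Int × List Char) (c : Char) : List Int × List Char :=
  if PySem.Chars.isdigit c then
    (st.1 ++ [(PySem.Int.ofChars? [c]).getD 0], [])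
  else
    pvDigitsA.foldl
      (fun s p => if PySem.Chars.isIn p.2 s.2 then (s.1 ++ [p.1], [c]) else s)
      (st.1, st.2 ++ [c])

def generate_integers_list_part_2 (line : String) : List Int :=
  (line.toList.foldl pvStepA ([], [])).1

-- ===== PORT B =====
def pvWordsB : List (Int × List Char) :=
  [(1, "one".toList), (2, "two".toList), (3, "three".toList), (4, "four".toList),
   (5, "five".toList), (6, "six".toList), (7, "seven".toList), (8, "eight".toList),
   (9, "nine".toList)]

-- for i, ch in enumerate(line): emit int(ch) on a digit, else the first word w with
-- line.endswith(w, 0, i+1) — ported as endswith on line[:i+1] (exact: 0 ≤ i+1 ≤ len(line));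
-- the for-with-break emitting at most one number per position is find? with a 0/1-element list.
def generate_integers_list_part_2_alt (line : String) : List Int :=
  (PySem.List.enumerate line.toList 0).flatMap (fun ic =>
    if PySem.Chars.isdigit ic.2 then [(PySem.Int.ofChars? [ic.2]).getD 0]
    else
      match pvWordsB.find? (fun p => PySem.Chars.endswith (line.toList.take (ic.1.toNat + 1)) p.2) with
      | some p => [p.1]
      | none => [])

-- ===== PRECONDITION & SPEC =====
def Spec_generate_integers_list_part_2 (line : String) (out : List Int) : Prop := out = generate_integers_list_part_2_alt line
instance (line : String) (out : List Int) : Decidable (Spec_generate_integers_list_part_2 line out) := by unfold Spec_generate_integers_list_part_2; infer_instance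

-- ===== CLAIM (what is proved, stated in full; the proofs are below) =====
def Claim_equal_generate_integers_list_part_2 : Prop := ∀ (line : String), Dom_generate_integers_list_part_2 line → Spec_generate_integers_list_part_2 line (generate_integers_list_part_2 line)

-- ===== LEMMAS AND PROOFS =====

theorem pv_wordsB_eq : pvWordsB = pvDigitsA := rfl

-- every digit word has length between 2 and 5
theorem pv_words_len : ∀ p ∈ pvDigitsA, 2 ≤ p.2.length ∧ p.2.length ≤ 5 := by decide

theorem pv_words_no_digit_bool :
    pvDigitsA.all (fun p => p.2.all (fun c => !PySem.Chars.isdigit c)) = true := by decide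

-- no digit word contains a decimal digit character
theorem pv_words_no_digit : ∀ p ∈ pvDigitsA, ∀ c ∈ p.2, PySem.Chars.isdigit c = false := by
  have h := pv_words_no_digit_bool
  simp only [List.all_eq_true, Bool.not_eq_true'] at h
  exact h

-- no digit word is an infix of another (distinct) digit word
set_option maxRecDepth 4000 in
theorem pv_words_no_contain : ∀ p ∈ pvDigitsA, ∀ q ∈ pvDigitsA, p.2 <:+: q.2 → p.2 = q.2 := by decide

-- a suffix of length ≥ 2 of one word that is a prefix of another word is both whole words
set_option maxRecDepth 10000 in
theorem pv_words_no_overlap : ∀ p ∈ pvDigitsA, ∀ q ∈ pvDigitsA, ∀ k ∈ List.range 6,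
    2 ≤ k → k ≤ q.2.length → q.2.drop (q.2.length - k) <+: p.2 →
    q.2.drop (q.2.length - k) = p.2 ∧ q.2.drop (q.2.length - k) = q.2 := by decide

theorem pv_suffix_of_suffix {u v x : List Char} (hu : u <:+ x) (hv : v <:+ x)
    (h : u.length ≤ v.length) : u <:+ v := by
  rcases List.suffix_or_suffix_of_suffix hu hv with h1 | h2
  · exact h1
  · have := h2.length_le
    have : v.length = u.length := by omega
    rw [h2.eq_of_length this]

theorem pv_infix_concat (w t : List Char) (c : Char) (h : ¬ w <:+: t) :
    w <:+: t ++ [c] ↔ w <:+ t ++ [c] := by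
  constructor
  · rintro ⟨s, u, hsu⟩
    rcases List.eq_nil_or_concat u with rfl | ⟨u', c', rfl⟩
    · exact ⟨s, by simpa using hsu⟩
    · exfalso; apply h
      have h1 : (s ++ w ++ u') ++ [c'] = t ++ [c] := by
        rw [← hsu]; simp [List.append_assoc]
      have h2 := (List.append_inj' h1 (by rfl)).1
      exact ⟨s, u', by rw [← h2]⟩
  · exact List.IsSuffix.isInfix

theorem pv_fold_id (ws : List (Int × List Char)) (out : List Int) (c : Char)
    (h : ∀ p ∈ ws, PySem.Chars.isIn p.2 [c] = false) :
    ws.foldl (fun s p => if PySem.Chars.isIn p.2 s.2 then (s.1 ++ [p.1], [c]) else s)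
      (out, [c]) = (out, [c]) := by
  induction ws with
  | nil => rfl
  | cons p ws ih =>
    simp only [List.foldl_cons, h p (by simp)]
    simp only [Bool.false_eq_true, if_false]
    exact ih (fun q hq => h q (by simp [hq]))

theorem pv_isIn_singleton_false (w : List Char) (c : Char) (hw : 2 ≤ w.length) :
    PySem.Chars.isIn w [c] = false := by
  rw [PySem.Chars.isIn_eq_false_iff]
  intro hinf
  have := hinf.length_le
  simp at this
  omega

theorem pv_foldA_inner (ws : List (Int × List Char)) (out : List Int) (t : List Char) (c : Char)
    (h : ∀ p ∈ ws, 2 ≤ p.2.length) :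
    ws.foldl (fun s p => if PySem.Chars.isIn p.2 s.2 then (s.1 ++ [p.1], [c]) else s) (out, t)
      = match ws.find? (fun p => PySem.Chars.isIn p.2 t) with
        | some p => (out ++ [p.1], [c])
        | none => (out, t) := by
  induction ws with
  | nil => rfl
  | cons p ws ih =>
    by_cases hp : PySem.Chars.isIn p.2 t = true
    · simp only [List.foldl_cons, List.find?_cons, hp, if_true]
      exact pv_fold_id ws (out ++ [p.1]) c
        (fun q hq => pv_isIn_singleton_false q.2 c (h q (by simp [hq])))
    · simp only [List.foldl_cons, List.find?_cons, hp]
      simp only [Bool.not_eq_true] at hp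
      simp only [Bool.false_eq_true, if_false]
      exact ih (fun q hq => h q (by simp [hq]))

theorem pv_find_congr {α : Type} (ws : List α) (p q : α → Bool)
    (h : ∀ a ∈ ws, p a = q a) : ws.find? p = ws.find? q := by
  induction ws with
  | nil => rfl
  | cons a ws ih =>
    simp only [List.find?_cons, h a (by simp)]
    rcases hq : q a with _ | _
    · exact ih (fun b hb => h b (by simp [hb]))
    · rfl

-- B's output for the characters `rest` of the line, `pre` being the part already scanned
def pvBseg : List Char → List Char → List Int
  | _, [] => []
  | pre, c :: rest =>
    (if PySem.Chars.isdigit c then [(PySem.Int.ofChars? [c]).getD 0]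
     else
       match pvWordsB.find? (fun p => PySem.Chars.endswith (pre ++ [c]) p.2) with
       | some p => [p.1]
       | none => []) ++ pvBseg (pre ++ [c]) rest

theorem pv_bridge (full : List Char) : ∀ (cs pre : List Char), full = pre ++ cs →
    ((PySem.List.enumerate cs (pre.length : Int)).flatMap (fun ic =>
      if PySem.Chars.isdigit ic.2 then [(PySem.Int.ofChars? [ic.2]).getD 0]
      else
        match pvWordsB.find? (fun p => PySem.Chars.endswith (full.take (ic.1.toNat + 1)) p.2) with
        | some p => [p.1]
        | none => []))
    = pvBseg pre cs := by
  intro cs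
  induction cs with
  | nil => intro pre h; simp [PySem.List.enumerate, pvBseg]
  | cons c rest ih =>
    intro pre h
    rw [PySem.List.enumerate_cons, List.flatMap_cons]
    have htake : full.take ((pre.length : Int).toNat + 1) = pre ++ [c] := by
      subst h
      rw [Int.toNat_natCast]
      rw [show pre.length + 1 = pre.length + [c].length by simp]
      rw [show pre ++ c :: rest = (pre ++ [c]) ++ rest by simp]
      rw [List.take_append_of_le_length (by simp)]
      simp
    have hstart : (pre.length : Int) + 1 = (((pre ++ [c]).length : Nat) : Int) := by
      simp
    rw [htake, hstart, ih (pre ++ [c]) (by simp [h])]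
    rfl

-- per-word equivalence of A's backward check and B's positional check, under the invariant
theorem pv_pred_eq (pre t : List Char) (c : Char) (w : List Char)
    (ht : t <:+ pre)
    (hw2 : 2 ≤ w.length)
    (hb : ¬ w <:+: t)
    (hc : ∀ s, s < pre.length - t.length → pre.drop s <+: w → (pre.drop s).length = w.length) :
    PySem.Chars.endswith (pre ++ [c]) w = PySem.Chars.isIn w (t ++ [c]) := by
  have htlen : t.length ≤ pre.length := ht.length_le
  have htc : t ++ [c] <:+ pre ++ [c] := by
    obtain ⟨a, rfl⟩ := ht
    exact ⟨a, by simp⟩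
  rcases hin : PySem.Chars.isIn w (t ++ [c]) with _ | _
  · -- isIn false: show endswith false
    rw [PySem.Chars.isIn_eq_false_iff] at hin
    rcases hend : PySem.Chars.endswith (pre ++ [c]) w with _ | _
    · rfl
    · exfalso
      rw [PySem.Chars.endswith_iff] at hend
      by_cases hlen : w.length ≤ t.length + 1
      · exact hin ((pv_suffix_of_suffix hend htc (by simp; omega)).isInfix)
      · have hwle : w.length ≤ pre.length + 1 := by
          have := hend.length_le; simpa using this
        have hdrop : w = (pre ++ [c]).drop ((pre ++ [c]).length - w.length) :=
          List.suffix_iff_eq_drop.mp hend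
        have hidx : (pre ++ [c]).length - w.length = pre.length + 1 - w.length := by simp
        have hle : pre.length + 1 - w.length ≤ pre.length := by omega
        rw [hidx, List.drop_append_of_le_length hle] at hdrop
        have hpref : pre.drop (pre.length + 1 - w.length) <+: w := ⟨[c], hdrop.symm⟩
        have hs : pre.length + 1 - w.length < pre.length - t.length := by omega
        have := hc _ hs hpref
        rw [List.length_drop] at this
        omega
  · -- isIn true: show endswith true
    rw [PySem.Chars.isIn_iff_infix] at hin
    rw [PySem.Chars.endswith_iff]
    exact ((pv_infix_concat w t c hb).mp hin).trans htc

-- main invariant-carrying induction: t is A's temp string, pre the scanned part of the line;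
-- invariants: t is a suffix of pre, no word is inside t, and no strict prefix of a word
-- is a suffix of pre reaching back beyond t (so nothing A forgot can still matter)
theorem pv_main : ∀ (rest pre : List Char) (out : List Int) (t : List Char),
    t <:+ pre →
    (∀ p ∈ pvDigitsA, ¬ p.2 <:+: t) →
    (∀ p ∈ pvDigitsA, ∀ s, s < pre.length - t.length →
        pre.drop s <+: p.2 → (pre.drop s).length = p.2.length) →
    (rest.foldl pvStepA (out, t)).1 = out ++ pvBseg pre rest := by
  intro rest
  induction rest with
  | nil => intro pre out t _ _ _; simp [pvBseg]
  | cons c rest ih =>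
    intro pre out t ha hb hc
    have htlen : t.length ≤ pre.length := ha.length_le
    simp only [List.foldl_cons, pvStepA, pvBseg]
    by_cases hd : PySem.Chars.isdigit c = true
    · simp only [hd, if_true]
      have hcnew : ∀ p ∈ pvDigitsA, ∀ s, s < (pre ++ [c]).length - ([] : List Char).length →
          (pre ++ [c]).drop s <+: p.2 → ((pre ++ [c]).drop s).length = p.2.length := by
        intro p hp s hs hpre
        exfalso
        have hsle : s ≤ pre.length := by simp at hs; omega
        rw [List.drop_append_of_le_length hsle] at hpre
        have hcmem : c ∈ p.2 := hpre.subset (by simp)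
        have h1 := pv_words_no_digit p hp c hcmem
        rw [hd] at h1
        simp at h1
      rw [ih (pre ++ [c]) (out ++ [(PySem.Int.ofChars? [c]).getD 0]) []
            (List.nil_suffix)
            (by intro p hp hinf
                have h1 := hinf.length_le
                have h2 := (pv_words_len p hp).1
                simp only [List.length_nil, Nat.le_zero] at h1
                omega)
            hcnew]
      simp
    · simp only [hd, Bool.false_eq_true, if_false]
      rw [pv_foldA_inner pvDigitsA out (t ++ [c]) c (fun p hp => (pv_words_len p hp).1)]
      have hcong : pvWordsB.find? (fun p => PySem.Chars.endswith (pre ++ [c]) p.2)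
          = pvDigitsA.find? (fun p => PySem.Chars.isIn p.2 (t ++ [c])) := by
        rw [pv_wordsB_eq]
        exact pv_find_congr _ _ _ (fun p hp =>
          pv_pred_eq pre t c p.2 ha ((pv_words_len p hp).1) (hb p hp) (hc p hp))
      rw [hcong]
      rcases hfind : pvDigitsA.find? (fun p => PySem.Chars.isIn p.2 (t ++ [c])) with _ | p
      · -- no word completed here
        simp only [hfind]
        have hnone : ∀ q ∈ pvDigitsA, PySem.Chars.isIn q.2 (t ++ [c]) = false := by
          intro q hq
          simpa using List.find?_eq_none.mp hfind q hq
        have hcnew : ∀ q ∈ pvDigitsA, ∀ s, s < (pre ++ [c]).length - (t ++ [c]).length →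
            (pre ++ [c]).drop s <+: q.2 → ((pre ++ [c]).drop s).length = q.2.length := by
          intro q hq s hs hpre
          exfalso
          have hs' : s < pre.length - t.length := by simp at hs; omega
          have hsle : s ≤ pre.length := by omega
          rw [List.drop_append_of_le_length hsle] at hpre
          have h1 : pre.drop s <+: q.2 := (List.prefix_append _ _).trans hpre
          have h2 := hc q hq s hs' h1
          have h3 := hpre.length_le
          simp at h2 h3
          omega
        rw [ih (pre ++ [c]) out (t ++ [c])
              (by obtain ⟨a, rfl⟩ := ha; exact ⟨a, by simp⟩)
              (fun q hq => by
                have h1 := hnone q hq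
                rwa [PySem.Chars.isIn_eq_false_iff] at h1)
              hcnew]
        simp
      · -- word p.2 completed exactly here
        simp only [hfind]
        have hpmem : p ∈ pvDigitsA := List.mem_of_find?_eq_some hfind
        have hpin : PySem.Chars.isIn p.2 (t ++ [c]) = true := by
          have := List.find?_some hfind
          simpa using this
        have hw0suf : p.2 <:+ pre ++ [c] := by
          rw [PySem.Chars.isIn_iff_infix] at hpin
          exact ((pv_infix_concat p.2 t c (hb p hpmem)).mp hpin).trans
            (by obtain ⟨a, rfl⟩ := ha; exact ⟨a, by simp⟩)
        have hL0 := pv_words_len p hpmem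
        have hcnew : ∀ q ∈ pvDigitsA, ∀ s, s < (pre ++ [c]).length - ([c] : List Char).length →
            (pre ++ [c]).drop s <+: q.2 → ((pre ++ [c]).drop s).length = q.2.length := by
          intro q hq s hs hpref
          have hs' : s < pre.length := by simp at hs; omega
          have husuf : (pre ++ [c]).drop s <:+ pre ++ [c] := List.drop_suffix _ _
          have hulen : ((pre ++ [c]).drop s).length = pre.length + 1 - s := by
            simp only [List.length_drop, List.length_append, List.length_cons, List.length_nil]
          have hu2 : 2 ≤ ((pre ++ [c]).drop s).length := by omega
          by_cases hcase : ((pre ++ [c]).drop s).length ≤ p.2.length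
          · -- u is a suffix of the matched word: overlap fact
            have huw0 : (pre ++ [c]).drop s <:+ p.2 := pv_suffix_of_suffix husuf hw0suf hcase
            have hudrop := List.suffix_iff_eq_drop.mp huw0
            have hkmem : ((pre ++ [c]).drop s).length ∈ List.range 6 := by
              rw [List.mem_range]; omega
            have hov := pv_words_no_overlap q hq p hpmem _ hkmem hu2 hcase
              (by rw [← hudrop]; exact hpref)
            have heq : (pre ++ [c]).drop s = q.2 := by rw [hudrop, hov.1]
            rw [heq]
          · -- the matched word sits inside u, hence inside q.2: containment fact
            have hw0u : p.2 <:+ (pre ++ [c]).drop s :=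
              pv_suffix_of_suffix hw0suf husuf (by omega)
            have hinf : p.2 <:+: q.2 := hw0u.isInfix.trans hpref.isInfix
            have hqq := pv_words_no_contain p hpmem q hq hinf
            have hlen := congrArg List.length hqq
            have hqle := hpref.length_le
            omega
        rw [ih (pre ++ [c]) (out ++ [p.1]) [c]
              ⟨pre, rfl⟩
              (by intro q hq hinf
                  have h1 := hinf.length_le
                  have h2 := (pv_words_len q hq).1
                  simp only [List.length_cons, List.length_nil] at h1
                  omega)
              hcnew]
        simp

-- ===== VERDICT (by name: the statement is the Claim_ definition above) =====
theorem generate_integers_list_part_2_spec : Claim_equal_generate_integers_list_part_2 := by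
  intro line _
  unfold Spec_generate_integers_list_part_2 generate_integers_list_part_2 generate_integers_list_part_2_alt
  have hbr := pv_bridge line.toList line.toList [] rfl
  rw [show ((([] : List Char).length : Int)) = (0 : Int) from rfl] at hbr
  rw [hbr]
  simpa using pv_main line.toList [] [] []
    (by simp)
    (by intro p hp h
        have h1 := h.length_le
        have h2 := (pv_words_len p hp).1
        simp only [List.length_nil, Nat.le_zero] at h1
        omega)
    (by intro p _ s hs; simp at hs)
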